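-- pv_equiv track=rewrite | github.com/Im2ql4u/Multi-Well-Quantum-Dots | src/observables/heisenberg_reference.py | enumerate_patterns_obc
-- ===== SOURCE A (Python) =====
-- import itertools
--
-- def enumerate_patterns_obc(N: int, n_down: int) -> list[tuple[int, ...]]:
--     """Same ordering convention as :func:`spin_amplitude_entanglement.enumerate_patterns`.
--
--     Returns spin patterns ``sigma in {0, 1}^N`` (0=up, 1=down) with
--     ``sum(sigma) == n_down`` in lexicographic order over the sorted index
--     set of down sites.
--     """
--     if not 0 <= n_down <= N:
--         raise ValueError(f"n_down must be in [0, N], got n_down={n_down}, N={N}.")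
--     out: list[tuple[int, ...]] = []
--     for down_set in itertools.combinations(range(N), n_down):
--         sigma = tuple(1 if i in down_set else 0 for i in range(N))
--         out.append(sigma)
--     return out
-- ===== SOURCE B (Python) =====
-- def enumerate_patterns_obc(N: int, n_down: int) -> list[tuple[int, ...]]:
--     """Recursive position-by-position generator: place a down (1) before an up (0),
--     pruning branches that cannot complete; reproduces combinations order."""
--     if not 0 <= n_down <= N:
--         raise ValueError(f"n_down must be in [0, N], got n_down={n_down}, N={N}.")
--     out: list[tuple[int, ...]] = []
--
--     def go(pos: int, rem: int, prefix: tuple[int, ...]) -> None: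
--         if pos == N:
--             out.append(prefix)
--             return
--         if rem > 0:
--             go(pos + 1, rem - 1, prefix + (1,))
--         if N - pos > rem:
--             go(pos + 1, rem, prefix + (0,))
--
--     go(0, n_down, ())
--     return out
-- ===== Notes on version B (the rewrite author's own statement) =====
-- stated objective: alternative
-- what changed: Replaces enumerating index combinations and scanning range(N) for membership per pattern by a direct recursive construction that builds each pattern position by position (down before up, pruning infeasible branches), reproducing the same lexicographic order.
import Mathlib
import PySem

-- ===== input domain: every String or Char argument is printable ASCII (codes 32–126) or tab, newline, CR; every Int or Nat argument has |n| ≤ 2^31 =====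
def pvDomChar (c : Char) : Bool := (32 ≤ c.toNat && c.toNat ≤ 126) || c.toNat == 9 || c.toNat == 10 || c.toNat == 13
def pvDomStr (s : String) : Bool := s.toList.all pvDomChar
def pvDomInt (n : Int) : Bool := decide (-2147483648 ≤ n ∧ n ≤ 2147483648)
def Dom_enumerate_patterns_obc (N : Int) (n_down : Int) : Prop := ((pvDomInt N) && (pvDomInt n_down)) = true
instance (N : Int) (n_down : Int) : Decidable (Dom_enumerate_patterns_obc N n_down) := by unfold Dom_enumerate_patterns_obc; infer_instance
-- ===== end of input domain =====

-- B replaces the combinations-then-membership-scan construction by a direct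
-- position-by-position recursion (down before up, with pruning); objective: alternative.

-- ===== PORT A =====
-- itertools.combinations(L, k) in lexicographic order (exact for a list input):
-- standard recursion equivalent to the documented behaviour of the library call.
def pyCombinations : List Int → Nat → List (List Int)
  | _, 0 => [[]]
  | [], _ + 1 => []
  | x :: xs, k + 1 =>
      ((pyCombinations xs k).map (fun c => x :: c)) ++ pyCombinations xs (k + 1)

def enumerate_patterns_obc (N : Int) (n_down : Int) : List (List Int) :=
  if 0 ≤ n_down ∧ n_down ≤ N then
    -- for down_set in combinations(range(N), n_down): out.append(sigma)
    (pyCombinations (PySem.List.pyRange 0 N 1) n_down.toNat).foldl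
      (fun out ds =>
        out ++ [(PySem.List.pyRange 0 N 1).map (fun i => if i ∈ ds then (1 : Int) else 0)])
      []
  else []  -- Python raises ValueError here (excluded by Pre_)

-- ===== PORT B =====
-- go(pos, rem, prefix): recursion on slots = N - pos
def goB : Nat → Nat → List Int → List (List Int)
  | 0, _, pre => [pre]
  | s + 1, rem, pre =>
      (if 0 < rem then goB s (rem - 1) (pre ++ [1]) else []) ++
      (if rem < s + 1 then goB s rem (pre ++ [0]) else [])

def enumerate_patterns_obc_alt (N : Int) (n_down : Int) : List (List Int) :=
  if 0 ≤ n_down ∧ n_down ≤ N then goB N.toNat n_down.toNat []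
  else []  -- Python raises ValueError here (excluded by Pre_)

-- ===== PRECONDITION & SPEC =====
-- Pre_ excludes exactly the inputs on which A (and B) raise ValueError.
def Pre_enumerate_patterns_obc (N : Int) (n_down : Int) : Prop := 0 ≤ n_down ∧ n_down ≤ N
instance (N : Int) (n_down : Int) : Decidable (Pre_enumerate_patterns_obc N n_down) := by
  unfold Pre_enumerate_patterns_obc; infer_instance

def pvWitness_enumerate_patterns_obc : Int × Int := (3, 1)

def Spec_enumerate_patterns_obc (N : Int) (n_down : Int) (out : List (List Int)) : Prop :=
  out = enumerate_patterns_obc_alt N n_down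
instance (N : Int) (n_down : Int) (out : List (List Int)) :
    Decidable (Spec_enumerate_patterns_obc N n_down out) := by
  unfold Spec_enumerate_patterns_obc; infer_instance

-- ===== CLAIM (what is proved, stated in full; the proofs are below) =====
def Claim_equal_enumerate_patterns_obc : Prop :=
  ∀ (N : Int) (n_down : Int), Dom_enumerate_patterns_obc N n_down →
    Pre_enumerate_patterns_obc N n_down →
    Spec_enumerate_patterns_obc N n_down (enumerate_patterns_obc N n_down)

-- ===== LEMMAS AND PROOFS =====

-- proof-side normal form: patterns over `slots` positions with `rem` downs, cons-built
def pvCore : Nat → Nat → List (List Int)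
  | 0, 0 => [[]]
  | 0, _ + 1 => []
  | s + 1, r =>
      (if 0 < r then (pvCore s (r - 1)).map (fun t => (1 : Int) :: t) else []) ++
      (if r < s + 1 then (pvCore s r).map (fun t => (0 : Int) :: t) else [])

theorem goB_eq_core (s : Nat) : ∀ (r : Nat) (pre : List Int), r ≤ s →
    goB s r pre = (pvCore s r).map (fun t => pre ++ t) := by
  induction s with
  | zero =>
    intro r pre hr
    interval_cases r
    simp [goB, pvCore]
  | succ s ih =>
    intro r pre hr
    rcases Nat.eq_zero_or_pos r with h0 | h0
    · subst h0
      simp only [goB, pvCore, if_neg (lt_irrefl 0), if_pos (Nat.succ_pos s),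
        List.nil_append, List.map_append, List.map_map]
      rw [ih 0 (pre ++ [0]) (Nat.zero_le s)]
      simp [Function.comp_def]
    · have h1 : r - 1 ≤ s := by omega
      simp only [goB, pvCore, if_pos h0]
      rw [ih (r - 1) (pre ++ [1]) h1]
      by_cases h2 : r < s + 1
      · rw [if_pos h2, if_pos h2, ih r (pre ++ [0]) (by omega)]
        simp [Function.comp_def]
      · rw [if_neg h2, if_neg h2]
        simp [Function.comp_def]

theorem foldl_append_singleton (f : List Int → List Int)
    (l : List (List Int)) : ∀ acc : List (List Int),
    l.foldl (fun out ds => out ++ [f ds]) acc = acc ++ l.map f := by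
  induction l with
  | nil => intro acc; simp
  | cons d t ih => intro acc; simp [ih, List.append_assoc]

theorem pyCombinations_mem_subset : ∀ (L : List Int) (k : Nat) (ds : List Int),
    ds ∈ pyCombinations L k → ∀ i ∈ ds, i ∈ L := by
  intro L
  induction L with
  | nil =>
    intro k ds hds i hi
    cases k with
    | zero => simp [pyCombinations] at hds; subst hds; simp at hi
    | succ k => simp [pyCombinations] at hds
  | cons x xs ih =>
    intro k ds hds i hi
    cases k with
    | zero =>
      simp [pyCombinations] at hds; subst hds; simp at hi
    | succ k =>
      simp only [pyCombinations, List.mem_append, List.mem_map] at hds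
      rcases hds with ⟨c, hc, rfl⟩ | hds
      · rcases List.mem_cons.mp hi with rfl | hi
        · exact List.mem_cons_self
        · exact List.mem_cons_of_mem _ (ih k c hc i hi)
      · exact List.mem_cons_of_mem _ (ih (k + 1) ds hds i hi)

theorem pyCombinations_nil_of_big : ∀ (L : List Int) (k : Nat),
    L.length < k → pyCombinations L k = [] := by
  intro L
  induction L with
  | nil => intro k hk; cases k with
    | zero => omega
    | succ k => rfl
  | cons x xs ih =>
    intro k hk
    cases k with
    | zero => simp at hk
    | succ k =>
      simp only [List.length_cons] at hk
      simp only [pyCombinations, ih k (by omega), ih (k + 1) (by omega),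
        List.map_nil, List.nil_append]

theorem map_ind_cons (x : Int) (xs : List Int) (ds : List Int) (hx : x ∉ xs) :
    xs.map (fun i => if i ∈ x :: ds then (1 : Int) else 0) =
    xs.map (fun i => if i ∈ ds then (1 : Int) else 0) := by
  apply List.map_congr_left
  intro i hi
  have : i ≠ x := fun h => hx (h ▸ hi)
  simp [List.mem_cons, this]

theorem combos_map_eq_core : ∀ (L : List Int) (k : Nat), k ≤ L.length → L.Nodup →
    (pyCombinations L k).map
      (fun ds => L.map (fun i => if i ∈ ds then (1 : Int) else 0)) =
    pvCore L.length k := by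
  intro L
  induction L with
  | nil =>
    intro k hk _
    have : k = 0 := by simpa using hk
    subst this
    simp [pyCombinations, pvCore]
  | cons x xs ih =>
    intro k hk hnd
    have hx : x ∉ xs := (List.nodup_cons.mp hnd).1
    have hnd' : xs.Nodup := (List.nodup_cons.mp hnd).2
    cases k with
    | zero =>
      have h0 := ih 0 (Nat.zero_le _) hnd'
      simp only [pyCombinations, List.map_cons, List.map_nil] at h0 ⊢
      simp only [List.length_cons, pvCore, if_neg (lt_irrefl 0),
        if_pos (Nat.succ_pos xs.length), List.nil_append, ← h0]
      simp
    | succ m =>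
      simp only [pyCombinations, List.map_append, List.map_map]
      have hfirst :
          (pyCombinations xs m).map
            ((fun ds => (x :: xs).map (fun i => if i ∈ ds then (1 : Int) else 0)) ∘
              (fun c => x :: c)) =
          (pvCore xs.length m).map (fun t => (1 : Int) :: t) := by
        rw [← ih m (by simpa using Nat.le_of_succ_le_succ hk) hnd', List.map_map]
        apply List.map_congr_left
        intro ds _
        simp only [Function.comp, List.map_cons]
        rw [map_ind_cons x xs ds hx]
        simp
      have hsecond :
          (pyCombinations xs (m + 1)).map
            (fun ds => (x :: xs).map (fun i => if i ∈ ds then (1 : Int) else 0)) =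
          (if m + 1 < xs.length + 1 then (pvCore xs.length (m + 1)).map (fun t => (0 : Int) :: t) else []) := by
        by_cases hm : m + 1 ≤ xs.length
        · rw [if_pos (by omega), ← ih (m + 1) hm hnd', List.map_map]
          apply List.map_congr_left
          intro ds hds
          have hxds : x ∉ ds := fun h => hx (pyCombinations_mem_subset xs (m + 1) ds hds x h)
          simp only [List.map_cons]
          simp [hxds]
        · rw [if_neg (by omega), pyCombinations_nil_of_big xs (m + 1) (by omega)]
          simp
      rw [hfirst, hsecond]
      simp only [List.length_cons, pvCore, if_pos (Nat.succ_pos m), Nat.add_sub_cancel]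

-- ===== VERDICT (by name: the statement is the Claim_ definition above) =====
theorem enumerate_patterns_obc_spec : Claim_equal_enumerate_patterns_obc := by
  intro N n_down _ hpre
  unfold Pre_enumerate_patterns_obc at hpre
  unfold Spec_enumerate_patterns_obc enumerate_patterns_obc enumerate_patterns_obc_alt
  rw [if_pos hpre, if_pos hpre]
  obtain ⟨h0, h1⟩ := hpre
  have hlen : (PySem.List.pyRange 0 N 1).length = N.toNat := by
    rw [PySem.List.length_pyRange_one]; omega
  have hk : n_down.toNat ≤ N.toNat := by omega
  rw [foldl_append_singleton, List.nil_append,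
    combos_map_eq_core (PySem.List.pyRange 0 N 1) n_down.toNat
      (by omega) (PySem.List.nodup_pyRange_one 0 N),
    hlen, goB_eq_core N.toNat n_down.toNat [] hk]
  simp
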